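-- pv_equiv track=rewrite | github.com/Charan83/py-learnings | 25_iterators_generators/8_beat_making_generator.py | current_beat
-- ===== SOURCE A (Python) =====
-- def current_beat(times):
--     beats = (1, 2, 3, 4)
--     idx = 0
--     _times = 0
--     while _times < times:
--         yield beats[idx]
--         if idx < len(beats)-1:
--             idx += 1
--         else:
--             idx = 0
--         _times += 1
-- ===== SOURCE B (Python) =====
-- def current_beat(times):
--     # Closed-form construction: the beat stream of length n is the pattern
--     # repeated n // 4 whole times, followed by its first n % 4 elements.
--     pattern = (1, 2, 3, 4)
--     n = max(times, 0)
--     yield from pattern * (n // 4)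
--     yield from pattern[:n % 4]
-- ===== Notes on version B (the rewrite author's own statement) =====
-- stated objective: faster
-- what changed: Replaces the element-by-element loop with a wrapping index by a closed-form construction: whole-pattern replication via tuple repetition followed by a prefix slice of the remainder, with no per-element control flow in Python.
import Mathlib
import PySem

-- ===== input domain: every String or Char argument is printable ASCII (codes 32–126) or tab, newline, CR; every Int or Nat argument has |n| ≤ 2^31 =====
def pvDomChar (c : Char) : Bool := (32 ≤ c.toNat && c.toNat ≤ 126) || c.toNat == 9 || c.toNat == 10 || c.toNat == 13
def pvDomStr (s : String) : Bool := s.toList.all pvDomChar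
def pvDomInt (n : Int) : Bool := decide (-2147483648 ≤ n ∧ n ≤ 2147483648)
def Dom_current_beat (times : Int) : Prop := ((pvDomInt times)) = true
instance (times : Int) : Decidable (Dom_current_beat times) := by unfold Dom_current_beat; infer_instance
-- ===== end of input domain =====

-- B builds the stream in closed form (whole-pattern replication plus a prefix slice of the remainder) instead of A's per-element loop with a wrapping index; measured faster by a constant factor (C-level tuple repetition). Return value only — both Pythons are generators.

-- ===== PORT A =====
-- while _times < times: yield beats[idx]; wrap idx with if/else; _times += 1
-- the loop runs (max times 0) = times.toNat iterations; fuel is that count.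
def current_beat_go : Nat → Int → List Int
  | 0, _ => []
  | Nat.succ f, idx =>
      ((PySem.List.pyGet? ([1, 2, 3, 4] : List Int) idx).getD 0) ::
        current_beat_go f (if idx < 4 - 1 then idx + 1 else 0)

def current_beat (times : Int) : List Int := current_beat_go times.toNat 0

-- ===== PORT B =====
-- n = max(times, 0); yield from pattern * (n // 4); yield from pattern[:n % 4]
-- tuple repetition → replicate + flatten; the prefix slice → take (n ≥ 0 here).
def current_beat_alt (times : Int) : List Int :=
  let pattern : List Int := [1, 2, 3, 4]
  let n := max times 0
  (List.replicate (n.toNat / 4) pattern).flatten ++ pattern.take (n.toNat % 4)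

-- ===== PRECONDITION & SPEC =====
def Spec_current_beat (times : Int) (out : List Int) : Prop := out = current_beat_alt times
instance (times : Int) (out : List Int) : Decidable (Spec_current_beat times out) := by unfold Spec_current_beat; infer_instance

-- ===== CLAIM =====
def Claim_equal_current_beat : Prop := ∀ (times : Int), Dom_current_beat times → Spec_current_beat times (current_beat times)

-- ===== LEMMAS AND PROOFS =====
lemma current_beat_go_step4 (m : Nat) :
    current_beat_go (m + 4) 0 = 1 :: 2 :: 3 :: 4 :: current_beat_go m 0 := by
  simp [current_beat_go, PySem.List.pyGet?, PySem.List.pyIdx?]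

lemma current_beat_go_closed (m : Nat) :
    current_beat_go m 0 =
      (List.replicate (m / 4) ([1, 2, 3, 4] : List Int)).flatten ++
        ([1, 2, 3, 4] : List Int).take (m % 4) := by
  induction m using Nat.strong_induction_on with
  | _ m ih =>
    match m, ih with
    | 0, _ => decide
    | 1, _ => decide
    | 2, _ => decide
    | 3, _ => decide
    | (k + 4), ih =>
      have hq : (k + 4) / 4 = k / 4 + 1 := by omega
      have hr : (k + 4) % 4 = k % 4 := by omega
      rw [current_beat_go_step4, ih k (by omega), hq, hr,
        List.replicate_succ, List.flatten_cons]
      rfl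

-- ===== VERDICT =====
theorem current_beat_spec : Claim_equal_current_beat := by
  intro times _
  show current_beat times = current_beat_alt times
  have hn : (max times 0).toNat = times.toNat := by omega
  simp only [current_beat, current_beat_alt, hn]
  exact current_beat_go_closed times.toNat
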